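-- pv_equiv track=rewrite | github.com/yongjip/multiversal-pictures | src/multiversal_pictures/review.py | _has_descendants
-- ===== SOURCE A (Python) =====
-- from typing import Any, Dict, List, Optional, Set
--
-- def _has_descendants(shot_id: str, dependents: Dict[str, Set[str]]) -> bool:
--     queue = list(dependents.get(str(shot_id), set()))
--     seen: Set[str] = set()
--     while queue:
--         current = queue.pop()
--         if current in seen:
--             continue
--         seen.add(current)
--         queue.extend(dependents.get(current, set()))
--     return bool(seen)
-- ===== SOURCE B (Python) =====
-- def _has_descendants(shot_id: str, dependents) -> bool:
--     # Direct lookup: the BFS marks at least one node as seen iff the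
--     # initial dependent set of shot_id is non-empty.
--     return bool(dependents.get(str(shot_id)))
-- ===== Notes on version B (the rewrite author's own statement) =====
-- stated objective: simpler
-- what changed: Replaced the whole BFS traversal (queue + seen set) by a single dictionary lookup: the BFS's seen set becomes non-empty exactly when the initial dependents.get(str(shot_id)) set is non-empty, so the result is bool(dependents.get(str(shot_id))).
import Mathlib
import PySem

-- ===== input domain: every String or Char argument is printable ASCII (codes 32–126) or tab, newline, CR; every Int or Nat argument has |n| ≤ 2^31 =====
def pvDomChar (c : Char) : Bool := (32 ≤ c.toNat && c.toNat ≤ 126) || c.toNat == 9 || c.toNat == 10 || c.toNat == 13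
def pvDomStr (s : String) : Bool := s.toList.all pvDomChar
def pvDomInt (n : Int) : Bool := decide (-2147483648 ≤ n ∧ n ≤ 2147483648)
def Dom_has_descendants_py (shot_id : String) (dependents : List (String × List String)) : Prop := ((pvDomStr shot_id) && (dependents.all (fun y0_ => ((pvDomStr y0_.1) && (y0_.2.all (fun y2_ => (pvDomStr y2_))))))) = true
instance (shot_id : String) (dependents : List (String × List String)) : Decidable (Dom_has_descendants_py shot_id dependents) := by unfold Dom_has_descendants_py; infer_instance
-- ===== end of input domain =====

-- B replaces A's BFS by a single dictionary lookup; equivalence is on the return value only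
-- (the Bool result cannot depend on Python's set-iteration order, so the List-of-elements model is exact here).

-- ===== PORT A =====

-- remaining work for the BFS: lengths of the value sets of keys not yet seen, plus the queue
def pvBfsMeasure (dependents : List (String × List String)) (queue : List String)
    (seen : PySem.Set String) : Nat :=
  ((dependents.filter (fun p => !(PySem.Set.contains seen p.1))).map (fun p => p.2.length)).sum
    + queue.length

-- termination helper: the measure drops when a fresh node is popped and its dependents enqueued
theorem pvBfsMeasure_lt (dependents : List (String × List String)) (queue : List String)
    (seen : PySem.Set String) (current : String)
    (hne : queue ≠ []) (hc : current ∉ seen) :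
    pvBfsMeasure dependents (queue.dropLast ++ ((PySem.Dict.mk dependents).getD current []))
        (PySem.Set.add seen current) < pvBfsMeasure dependents queue seen := by
  have mono : ∀ (deps : List (String × List String)),
      ((deps.filter (fun p => !(PySem.Set.contains (PySem.Set.add seen current) p.1))).map
          (fun p => p.2.length)).sum
      ≤ ((deps.filter (fun p => !(PySem.Set.contains seen p.1))).map (fun p => p.2.length)).sum := by
    intro deps
    induction deps with
    | nil => simp
    | cons hd tl ih =>
      simp only [List.filter_cons]
      simp at ih
      by_cases h1 : hd.1 ∈ seen <;> by_cases h2 : hd.1 = current <;>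
        simp [h1, h2, hc] <;> omega
  have key : ∀ (deps : List (String × List String)),
      ((PySem.Dict.mk deps).getD current []).length
        + ((deps.filter (fun p => !(PySem.Set.contains (PySem.Set.add seen current) p.1))).map
            (fun p => p.2.length)).sum
      ≤ ((deps.filter (fun p => !(PySem.Set.contains seen p.1))).map (fun p => p.2.length)).sum := by
    intro deps
    induction deps with
    | nil => simp [PySem.Dict.getD_eq_get?_getD, PySem.Dict.get?]
    | cons hd tl ih =>
      obtain ⟨k, v⟩ := hd
      rw [PySem.Dict.getD_eq_get?_getD, PySem.Dict.get?_mk_cons]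
      rw [PySem.Dict.getD_eq_get?_getD] at ih
      simp only [List.filter_cons]
      simp at ih
      by_cases hk : k = current
      · subst hk
        have hm := mono tl
        simp at hm
        simp [hc]
        omega
      · by_cases h1 : k ∈ seen <;>
          simp [h1, hk, hc] <;> omega
  have hq : queue.dropLast.length = queue.length - 1 := List.length_dropLast
  have hpos : 0 < queue.length := List.length_pos_iff.mpr hne
  have hk := key dependents
  simp only [pvBfsMeasure, List.length_append]
  omega

-- the 'while queue:' loop of A: pop from the back, skip seen, enqueue dependents of fresh nodes
def pvBfsLoop (dependents : List (String × List String)) (queue : List String)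
    (seen : PySem.Set String) : Bool :=
  match hq : queue.getLast? with
  | none => !seen.isEmpty          -- bool(seen)
  | some current =>
    if hc : PySem.Set.contains seen current = true then
      pvBfsLoop dependents queue.dropLast seen
    else
      pvBfsLoop dependents (queue.dropLast ++ ((PySem.Dict.mk dependents).getD current []))
        (PySem.Set.add seen current)
termination_by pvBfsMeasure dependents queue seen
decreasing_by
  · have hne : queue ≠ [] := by intro h; subst h; simp at hq
    have hq' : queue.dropLast.length = queue.length - 1 := List.length_dropLast
    have hpos : 0 < queue.length := List.length_pos_iff.mpr hne
    simp only [pvBfsMeasure]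
    omega
  · exact pvBfsMeasure_lt dependents queue seen current
      (by intro h; subst h; simp at hq)
      (fun hm => hc ((PySem.Set.contains_iff _ _).mpr hm))

def has_descendants_py (shot_id : String) (dependents : List (String × List String)) : Bool :=
  -- queue = list(dependents.get(str(shot_id), set())); str(shot_id) = shot_id
  pvBfsLoop dependents ((PySem.Dict.mk dependents).getD shot_id []) PySem.Set.empty

-- ===== PORT B =====
def has_descendants_py_alt (shot_id : String) (dependents : List (String × List String)) : Bool :=
  -- bool(dependents.get(str(shot_id))): None and the empty set are falsy
  match (PySem.Dict.mk dependents).get? shot_id with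
  | none => false
  | some v => !v.isEmpty

-- ===== PRECONDITION & SPEC =====
def Spec_has_descendants_py (shot_id : String) (dependents : List (String × List String)) (out : Bool) : Prop := out = has_descendants_py_alt shot_id dependents
instance (shot_id : String) (dependents : List (String × List String)) (out : Bool) : Decidable (Spec_has_descendants_py shot_id dependents out) := by unfold Spec_has_descendants_py; infer_instance

-- ===== CLAIM (what is proved, stated in full; the proofs are below) =====
def Claim_equal_has_descendants_py : Prop := ∀ (shot_id : String) (dependents : List (String × List String)), Dom_has_descendants_py shot_id dependents → Spec_has_descendants_py shot_id dependents (has_descendants_py shot_id dependents)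

-- ===== LEMMAS AND PROOFS =====

-- the BFS returns true iff it starts with a non-empty queue or non-empty seen set
theorem pvBfsLoop_eq (dependents : List (String × List String)) (queue : List String)
    (seen : PySem.Set String) :
    pvBfsLoop dependents queue seen = (!queue.isEmpty || !seen.isEmpty) := by
  induction queue, seen using pvBfsLoop.induct (dependents := dependents) with
  | case1 queue seen hq =>
    have h0 : queue = [] := List.getLast?_eq_none_iff.mp hq
    subst h0
    simp [pvBfsLoop]
  | case2 queue seen current hq hc ih =>
    have hne : queue ≠ [] := by intro h; subst h; simp at hq
    have hseen : seen ≠ [] := by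
      intro h
      have hm := (PySem.Set.contains_iff seen current).mp hc
      rw [h] at hm
      cases hm
    rw [pvBfsLoop]
    split <;> rename_i h'
    · rw [h'] at hq; cases hq
    · rename_i x
      rw [h'] at hq
      obtain rfl := Option.some.inj hq
      rw [dif_pos hc, ih]
      rcases List.exists_cons_of_ne_nil hseen with ⟨a, as, rfl⟩
      rcases List.exists_cons_of_ne_nil hne with ⟨b, bs, rfl⟩
      simp
  | case3 queue seen current hq hc ih =>
    have hne : queue ≠ [] := by intro h; subst h; simp at hq
    have hadd : PySem.Set.add seen current ≠ [] := by
      intro h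
      have hm : current ∈ PySem.Set.add seen current :=
        (PySem.Set.mem_add seen current current).mpr (Or.inr rfl)
      rw [h] at hm
      cases hm
    rw [pvBfsLoop]
    split <;> rename_i h'
    · rw [h'] at hq; cases hq
    · rename_i x
      rw [h'] at hq
      obtain rfl := Option.some.inj hq
      rw [dif_neg hc, ih]
      rcases List.exists_cons_of_ne_nil hadd with ⟨a, as, he⟩
      rcases List.exists_cons_of_ne_nil hne with ⟨b, bs, rfl⟩
      rw [he]
      simp

-- ===== VERDICT (by name: the statement is the Claim_ definition above) =====
theorem has_descendants_py_spec : Claim_equal_has_descendants_py := by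
  intro shot_id dependents _
  unfold Spec_has_descendants_py has_descendants_py has_descendants_py_alt
  rw [pvBfsLoop_eq]
  rw [PySem.Dict.getD_eq_get?_getD]
  cases h : (PySem.Dict.mk dependents).get? shot_id with
  | none => simp [PySem.Set.empty]
  | some v => simp [PySem.Set.empty]
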